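-- pv_equiv track=rewrite | github.com/8Dionysus/aoa-skills | scripts/skill_lineage_surface.py | derive_lineage_cohorts
-- ===== SOURCE A (Python) =====
-- from typing import Any, Mapping, Sequence
--
-- PUBLISHED_LINEAGE_COHORT = "published_lineage"
--
-- PENDING_LINEAGE_COHORT = "pending_lineage"
--
-- def derive_lineage_cohorts(skill_entries: Sequence[Mapping[str, Any]]) -> dict[str, list[str]]:
--     published: list[str] = []
--     pending: list[str] = []
--     for entry in skill_entries:
--         if entry.get("lineage_state") == "pending":
--             pending.append(str(entry["name"]))
--         else:
--             published.append(str(entry["name"]))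
--     return {
--         PUBLISHED_LINEAGE_COHORT: sorted(published),
--         PENDING_LINEAGE_COHORT: sorted(pending),
--     }
-- ===== SOURCE B (Python) =====
-- PUBLISHED_LINEAGE_COHORT = "published_lineage"
--
-- PENDING_LINEAGE_COHORT = "pending_lineage"
--
--
-- def derive_lineage_cohorts(skill_entries):
--     # One global stable sort by name, then a partition that stays sorted.
--     ordered = sorted(skill_entries, key=lambda e: str(e["name"]))
--     return {
--         PUBLISHED_LINEAGE_COHORT: [
--             str(e["name"]) for e in ordered if e.get("lineage_state") != "pending"
--         ],
--         PENDING_LINEAGE_COHORT: [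
--             str(e["name"]) for e in ordered if e.get("lineage_state") == "pending"
--         ],
--     }
-- ===== Notes on version B (the rewrite author's own statement) =====
-- stated objective: alternative
-- what changed: Instead of partitioning first and sorting each cohort separately, B performs one global stable sort of the entries by name and then partitions the already-sorted sequence with two filtered comprehensions, relying on stability so no per-cohort sort is needed.
import Mathlib
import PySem

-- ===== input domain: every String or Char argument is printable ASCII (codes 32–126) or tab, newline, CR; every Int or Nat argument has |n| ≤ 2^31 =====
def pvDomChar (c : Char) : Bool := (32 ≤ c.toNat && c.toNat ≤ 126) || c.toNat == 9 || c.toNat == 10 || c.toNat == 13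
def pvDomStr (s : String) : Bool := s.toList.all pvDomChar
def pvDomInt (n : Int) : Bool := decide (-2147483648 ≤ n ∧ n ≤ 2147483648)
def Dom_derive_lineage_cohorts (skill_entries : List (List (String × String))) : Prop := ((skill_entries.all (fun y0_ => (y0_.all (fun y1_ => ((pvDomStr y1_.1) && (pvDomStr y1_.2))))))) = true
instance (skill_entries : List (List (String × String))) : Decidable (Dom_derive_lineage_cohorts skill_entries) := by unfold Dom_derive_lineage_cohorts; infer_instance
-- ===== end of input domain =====

-- B changes the decomposition: one global stable sort by name, then a partition of the
-- sorted sequence (no per-cohort sorts); same cost, proved to return A's exact value.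
-- ===== PORT A =====
-- entry.get("lineage_state") == "pending"
def pvIsPending (entry : List (String × String)) : Bool :=
  PySem.Dict.get? ⟨entry⟩ "lineage_state" == some "pending"

-- str(entry["name"]) — Pre_ guarantees the key is present, so the default is never read
def pvName (entry : List (String × String)) : String :=
  PySem.Dict.getD ⟨entry⟩ "name" ""

def derive_lineage_cohorts (skill_entries : List (List (String × String))) : List (String × List String) :=
  let st := skill_entries.foldl
    (fun (acc : List String × List String) entry =>
      if pvIsPending entry then (acc.1, acc.2 ++ [pvName entry])
      else (acc.1 ++ [pvName entry], acc.2))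
    ([], [])
  [("published_lineage", PySem.List.sorted st.1 (fun x => x) false),
   ("pending_lineage", PySem.List.sorted st.2 (fun x => x) false)]

-- ===== PORT B =====
def derive_lineage_cohorts_alt (skill_entries : List (List (String × String))) : List (String × List String) :=
  let ordered := PySem.List.sorted skill_entries pvName false
  [("published_lineage", (ordered.filter (fun e => !pvIsPending e)).map pvName),
   ("pending_lineage", (ordered.filter (fun e => pvIsPending e)).map pvName)]

-- ===== PRECONDITION & SPEC =====
-- A raises KeyError on any entry without a "name" key (so does B); exactly those inputs are excluded.
def Pre_derive_lineage_cohorts (skill_entries : List (List (String × String))) : Prop :=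
  (skill_entries.all (fun e => e.any (fun p => p.1 == "name"))) = true
instance (skill_entries : List (List (String × String))) : Decidable (Pre_derive_lineage_cohorts skill_entries) := by unfold Pre_derive_lineage_cohorts; infer_instance

def pvWitness_derive_lineage_cohorts : (List (List (String × String))) :=
  [[("name", "b"), ("lineage_state", "pending")], [("name", "a")]]

def Spec_derive_lineage_cohorts (skill_entries : List (List (String × String))) (out : List (String × List String)) : Prop := out = derive_lineage_cohorts_alt skill_entries
instance (skill_entries : List (List (String × String))) (out : List (String × List String)) : Decidable (Spec_derive_lineage_cohorts skill_entries out) := by unfold Spec_derive_lineage_cohorts; infer_instance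

-- ===== CLAIM (what is proved, stated in full; the proofs are below) =====
def Claim_equal_derive_lineage_cohorts : Prop := ∀ (skill_entries : List (List (String × String))), Dom_derive_lineage_cohorts skill_entries → Pre_derive_lineage_cohorts skill_entries → Spec_derive_lineage_cohorts skill_entries (derive_lineage_cohorts skill_entries)

-- ===== LEMMAS AND PROOFS =====

-- inserting below every element of M puts v at the front
lemma insertBy_lt_head {v : String} {M : List String} (h : ∀ e ∈ M, v < e) :
    PySem.List.insertBy (fun a b => decide (a < b)) v M = v :: M := by
  cases M with
  | nil => rfl
  | cons e t => simp [PySem.List.insertBy, h e (by simp)]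

-- filter∘map commutes with one stable insertion into a key-sorted list
lemma filter_map_insertBy {α : Type} (nm : α → String) (p : α → Bool) (x : α) :
    ∀ L : List α, L.Pairwise (fun a b => nm a ≤ nm b) →
    ((PySem.List.insertBy (fun a b => decide (nm a < nm b)) x L).filter p).map nm
      = if p x then PySem.List.insertBy (fun a b => decide (a < b)) (nm x) ((L.filter p).map nm)
        else (L.filter p).map nm := by
  intro L
  induction L with
  | nil =>
    intro _
    by_cases hp : p x <;> simp [PySem.List.insertBy, hp]
  | cons y ys ih =>
    intro hpair
    rw [List.pairwise_cons] at hpair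
    obtain ⟨hy, hys⟩ := hpair
    by_cases hlt : nm x < nm y
    · have hins : PySem.List.insertBy (fun a b => decide (nm a < nm b)) x (y :: ys)
          = x :: y :: ys := by
        simp only [PySem.List.insertBy, hlt, decide_true, if_true]
      rw [hins]
      by_cases hp : p x
      · have hfront : ∀ e ∈ ((y :: ys).filter p).map nm, nm x < e := by
          intro e he
          simp only [List.mem_map, List.mem_filter] at he
          obtain ⟨z, ⟨hz, _⟩, rfl⟩ := he
          rcases List.mem_cons.mp hz with rfl | hz'
          · exact hlt
          · exact lt_of_lt_of_le hlt (hy z hz')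
        rw [if_pos hp, insertBy_lt_head hfront]
        simp only [List.filter_cons, hp, if_true, List.map_cons]
      · rw [if_neg hp]
        simp [List.filter_cons, hp]
    · have hins : PySem.List.insertBy (fun a b => decide (nm a < nm b)) x (y :: ys)
          = y :: PySem.List.insertBy (fun a b => decide (nm a < nm b)) x ys := by
        simp only [PySem.List.insertBy, hlt, decide_false, Bool.false_eq_true, if_false]
      rw [hins]
      have hrec := ih hys
      by_cases hq : p y
      · simp only [List.filter_cons, hq, if_true, List.map_cons, hrec]
        by_cases hp : p x
        · rw [if_pos hp, if_pos hp]
          have hstep : PySem.List.insertBy (fun a b => decide (a < b)) (nm x)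
              (nm y :: ((ys.filter p).map nm))
              = nm y :: PySem.List.insertBy (fun a b => decide (a < b)) (nm x)
                  ((ys.filter p).map nm) := by
            simp only [PySem.List.insertBy, hlt, decide_false, Bool.false_eq_true, if_false]
          rw [hstep]
        · rw [if_neg hp, if_neg hp]
      · simp only [List.filter_cons, hq, Bool.false_eq_true, if_false, hrec]

-- stability: sorting by name then partitioning = partitioning then sorting the names
lemma sorted_filter_map {α : Type} (nm : α → String) (p : α → Bool) :
    ∀ xs : List α,
    ((PySem.List.sorted xs nm false).filter p).map nm
      = PySem.List.sorted ((xs.filter p).map nm) (fun x => x) false := by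
  intro xs
  induction xs using List.reverseRecOn with
  | nil => rfl
  | append_singleton xs x ih =>
    have hA : PySem.List.sorted (xs ++ [x]) nm false
        = PySem.List.insertBy (fun a b => decide (nm a < nm b)) x (PySem.List.sorted xs nm false) := by
      simp [PySem.List.sorted_eq_foldl_insertBy, List.foldl_append]
    rw [hA, filter_map_insertBy nm p x _ (PySem.List.sorted_pairwise xs nm)]
    by_cases hp : p x
    · have hB : PySem.List.sorted (((xs.filter p).map nm) ++ [nm x]) (fun x => x) false
          = PySem.List.insertBy (fun a b => decide (a < b)) (nm x)
              (PySem.List.sorted ((xs.filter p).map nm) (fun x => x) false) := by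
        simp [PySem.List.sorted_eq_foldl_insertBy, List.foldl_append]
      simp [hp, List.filter_append, ih, hB]
    · simp [hp, List.filter_append, ih]

-- A's accumulating loop builds exactly the two filtered name lists
lemma foldA_eq {α : Type} (c : α → Bool) (nm : α → String) :
    ∀ (xs : List α) (acc : List String × List String),
    xs.foldl (fun (acc : List String × List String) e =>
        if c e then (acc.1, acc.2 ++ [nm e]) else (acc.1 ++ [nm e], acc.2)) acc
      = (acc.1 ++ ((xs.filter (fun e => !c e)).map nm), acc.2 ++ ((xs.filter c).map nm)) := by
  intro xs
  induction xs with
  | nil => intro acc; simp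
  | cons y ys ih =>
    intro acc
    by_cases hc : c y <;> simp [List.foldl_cons, hc, ih]

-- ===== VERDICT (by name: the statement is the Claim_ definition above) =====
theorem derive_lineage_cohorts_spec : Claim_equal_derive_lineage_cohorts := by
  intro xs _ _
  unfold Spec_derive_lineage_cohorts derive_lineage_cohorts derive_lineage_cohorts_alt
  rw [foldA_eq pvIsPending pvName xs ([], [])]
  simp only [List.nil_append]
  rw [← sorted_filter_map pvName (fun e => !pvIsPending e) xs,
      ← sorted_filter_map pvName (fun e => pvIsPending e) xs]
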